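-- pv_equiv track=rewrite | github.com/braze-lebowski/growth-shares-lambda-user-csv-import | braze_user_csv_import/handlers.py | chunk_grouper
-- ===== SOURCE A (Python) =====
-- from typing import Dict, List
--
-- def chunk_grouper(payloads: Dict):
--     '''
--     Takes the users/track payloads and groups them
--     into requests to optimise Braze's users/track API.
--     '''
--     grouped_paylaods = {}
--     for destination_key, payloads in payloads.items():
--         flat = {
--             'attributes': [],
--             'purchases': [],
--             'events': [],
--         }
--         for payload in payloads:
--             for users_track_key, value in payload:
--                 flat[users_track_key].append(value)
--
--         max_len = max(
--             len(flat['attributes']),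
--             len(flat['purchases']),
--             len(flat['events'])
--         )
--         step = 75
--         users_track_payloads = []
--         for start_index in range(0, max_len, step):
--             end_index = start_index + step
--             users_track_payloads.append({
--                 'attributes': flat['attributes'][start_index:end_index],
--                 'purchases':  flat['purchases'][start_index:end_index],
--                 'events':     flat['events'][start_index:end_index],
--             })
--         grouped_paylaods[destination_key] = users_track_payloads
--     return grouped_paylaods
-- ===== SOURCE B (Python) =====
-- def _chunks(xs):
--     out = []
--     while xs:
--         out.append(xs[:75])
--         xs = xs[75:]
--     return out
--
--
-- def _zip3(a, p, e):
--     out = []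
--     while a or p or e:
--         out.append({
--             'attributes': a[0] if a else [],
--             'purchases': p[0] if p else [],
--             'events': e[0] if e else [],
--         })
--         a, p, e = a[1:], p[1:], e[1:]
--     return out
--
--
-- def chunk_grouper(payloads):
--     grouped = {}
--     for destination_key, plist in payloads.items():
--         rows = [kv for payload in plist for kv in payload]
--         attrs = [v for k, v in rows if k == 'attributes']
--         purchases = [v for k, v in rows if k == 'purchases']
--         events = [v for k, v in rows if k == 'events']
--         grouped[destination_key] = _zip3(_chunks(attrs), _chunks(purchases), _chunks(events))
--     return grouped
-- ===== Notes on version B (the rewrite author's own statement) =====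
-- stated objective: alternative
-- what changed: B flattens each destination's payloads once and extracts the three value streams by filter comprehensions instead of A's dict-dispatch append loop, then chunks each stream independently and zips the chunk columns with a manual zip-longest (fill []) instead of A's lockstep max_len/range slicing.
import Mathlib
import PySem

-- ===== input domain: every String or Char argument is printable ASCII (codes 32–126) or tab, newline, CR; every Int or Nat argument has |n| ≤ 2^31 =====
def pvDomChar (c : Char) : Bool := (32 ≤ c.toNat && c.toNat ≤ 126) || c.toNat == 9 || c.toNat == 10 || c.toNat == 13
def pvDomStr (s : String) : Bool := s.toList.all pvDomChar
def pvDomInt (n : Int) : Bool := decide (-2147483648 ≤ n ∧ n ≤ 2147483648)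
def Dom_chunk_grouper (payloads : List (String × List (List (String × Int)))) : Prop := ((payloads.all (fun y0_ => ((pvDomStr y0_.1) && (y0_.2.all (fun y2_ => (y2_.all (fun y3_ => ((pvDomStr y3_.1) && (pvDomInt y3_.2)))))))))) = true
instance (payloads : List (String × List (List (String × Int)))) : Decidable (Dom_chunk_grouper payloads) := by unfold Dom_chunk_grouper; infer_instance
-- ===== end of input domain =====

-- B: flatten + three filter passes, chunk each stream independently, zip-longest the chunk columns (alternative decomposition, same cost).


-- ===== PORT A =====
-- dict parameter/result are association lists; 'flat[k].append(v)' is Dict.modify with default []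
-- (exact on Pre_, where every key is one of the three and hence present in flat).
def chunk_grouper (payloads : List (String × List (List (String × Int)))) : List (String × List (List (String × List Int))) :=
  (payloads.foldl (fun grouped dp =>
    let flat : PySem.Dict String (List Int) :=
      dp.2.foldl (fun f payload =>
        payload.foldl (fun f kv => f.modify kv.1 [] (fun xs => xs ++ [kv.2])) f)
        (PySem.Dict.mk [("attributes", []), ("purchases", []), ("events", [])])
    let max_len : Int :=
      max (max ((flat.getD "attributes" []).length : Int) ((flat.getD "purchases" []).length : Int))
          ((flat.getD "events" []).length : Int)
    let step : Int := 75
    let users_track_payloads :=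
      (PySem.List.pyRange 0 max_len step).foldl (fun acc start_index =>
        let end_index := start_index + step
        acc ++ [[("attributes", PySem.List.slice (flat.getD "attributes" []) (some start_index) (some end_index)),
                 ("purchases",  PySem.List.slice (flat.getD "purchases" [])  (some start_index) (some end_index)),
                 ("events",     PySem.List.slice (flat.getD "events" [])     (some start_index) (some end_index))]]) []
    grouped.insert dp.1 users_track_payloads) PySem.Dict.empty).items

-- ===== PORT B =====
-- while xs: out.append(xs[:75]); xs = xs[75:]  — nonnegative-literal slices are take/drop
-- (PySem.List.slice_to_natCast / slice_from_natCast).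
def chunksB (xs : List Int) : List (List Int) :=
  if h : xs = [] then []
  else List.take 75 xs :: chunksB (List.drop 75 xs)
termination_by xs.length
decreasing_by
  simp only [List.length_drop]
  have : 0 < xs.length := List.length_pos_iff.mpr h
  omega

-- while a or p or e: append row of heads (a[0] if a else []); step to the tails (x[1:]).
def zip3B (a p e : List (List Int)) : List (List (String × List Int)) :=
  if h : a = [] ∧ p = [] ∧ e = [] then []
  else [("attributes", a.headD []), ("purchases", p.headD []), ("events", e.headD [])] ::
       zip3B a.tail p.tail e.tail
termination_by a.length + p.length + e.length
decreasing_by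
  simp only [List.length_tail]
  rcases a with _ | ⟨x, a⟩ <;> rcases p with _ | ⟨y, p⟩ <;> rcases e with _ | ⟨z, e⟩ <;>
    simp_all <;> omega

def chunk_grouper_alt (payloads : List (String × List (List (String × Int)))) : List (String × List (List (String × List Int))) :=
  (payloads.foldl (fun grouped dp =>
    let rows := dp.2.flatMap (fun payload => payload)
    let attrs := (rows.filter (fun kv => kv.1 == "attributes")).map (fun kv => kv.2)
    let purchases := (rows.filter (fun kv => kv.1 == "purchases")).map (fun kv => kv.2)
    let events := (rows.filter (fun kv => kv.1 == "events")).map (fun kv => kv.2)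
    grouped.insert dp.1 (zip3B (chunksB attrs) (chunksB purchases) (chunksB events))) PySem.Dict.empty).items

-- ===== PRECONDITION & SPEC =====
-- Pre_ excludes exactly the inputs where A raises KeyError: a users/track key other than the three.
def Pre_chunk_grouper (payloads : List (String × List (List (String × Int)))) : Prop :=
  (payloads.all (fun dp => dp.2.all (fun payload => payload.all (fun kv =>
    kv.1 == "attributes" || kv.1 == "purchases" || kv.1 == "events")))) = true
instance (payloads : List (String × List (List (String × Int)))) : Decidable (Pre_chunk_grouper payloads) := by unfold Pre_chunk_grouper; infer_instance

def pvWitness_chunk_grouper : (List (String × List (List (String × Int)))) :=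
  [("d", [[("attributes", 1), ("events", 2)], [("purchases", 3)]])]

def Spec_chunk_grouper (payloads : List (String × List (List (String × Int)))) (out : List (String × List (List (String × List Int)))) : Prop := out = chunk_grouper_alt payloads
instance (payloads : List (String × List (List (String × Int)))) (out : List (String × List (List (String × List Int)))) : Decidable (Spec_chunk_grouper payloads out) := by unfold Spec_chunk_grouper; infer_instance

-- ===== CLAIM (what is proved, stated in full; the proofs are below) =====
def Claim_equal_chunk_grouper : Prop := ∀ (payloads : List (String × List (List (String × Int)))), Dom_chunk_grouper payloads → Pre_chunk_grouper payloads → Spec_chunk_grouper payloads (chunk_grouper payloads)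

-- ===== LEMMAS AND PROOFS =====

-- the k-th row of A's chunked output, in drop/take normal form
def pvRow (a p e : List Int) (k : Nat) : List (String × List Int) :=
  [("attributes", (a.drop (75 * k)).take 75),
   ("purchases",  (p.drop (75 * k)).take 75),
   ("events",     (e.drop (75 * k)).take 75)]

theorem pv_chunksB_nil : chunksB [] = [] := by simp [chunksB]

theorem pv_headD_chunksB (a : List Int) : (chunksB a).headD [] = a.take 75 := by
  rcases eq_or_ne a [] with h | h
  · subst h; simp [chunksB]
  · rw [chunksB]; simp [h]

theorem pv_tail_chunksB (a : List Int) : (chunksB a).tail = chunksB (a.drop 75) := by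
  rcases eq_or_ne a [] with h | h
  · subst h; simp [chunksB]
  · rw [chunksB]; simp [h]

theorem pvRow_succ (a p e : List Int) (k : Nat) :
    pvRow a p e (k + 1) = pvRow (a.drop 75) (p.drop 75) (e.drop 75) k := by
  simp only [pvRow, List.drop_drop]
  have h1 : 75 + 75 * k = 75 * (k + 1) := by ring
  rw [h1]

theorem pv_cnt_succ (n : Nat) (h : 0 < n) : (n + 74) / 75 = (n - 75 + 74) / 75 + 1 := by omega

-- core: zip-longest over the three chunk columns equals A's indexed rows
theorem pv_zip3_chunks (a p e : List Int) :
    zip3B (chunksB a) (chunksB p) (chunksB e) =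
      (List.range ((max (max a.length p.length) e.length + 74) / 75)).map (pvRow a p e) := by
  by_cases hall : a = [] ∧ p = [] ∧ e = []
  · obtain ⟨ha, hp, he⟩ := hall; subst ha; subst hp; subst he
    simp [pv_chunksB_nil, zip3B]
  · have hmax : 0 < max (max a.length p.length) e.length := by
      rcases a with _ | _ <;> rcases p with _ | _ <;> rcases e with _ | _ <;> simp_all
    have hne : ¬ (chunksB a = [] ∧ chunksB p = [] ∧ chunksB e = []) := by
      intro ⟨h1, h2, h3⟩
      apply hall
      refine ⟨?_, ?_, ?_⟩ <;> [skip; skip; skip] <;>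
        first
        | (by_cases h : a = [] <;> [exact h; (rw [chunksB] at h1; simp [h] at h1)])
        | (by_cases h : p = [] <;> [exact h; (rw [chunksB] at h2; simp [h] at h2)])
        | (by_cases h : e = [] <;> [exact h; (rw [chunksB] at h3; simp [h] at h3)])
    rw [zip3B]
    simp only [hne, dite_false, pv_headD_chunksB, pv_tail_chunksB]
    rw [pv_zip3_chunks (a.drop 75) (p.drop 75) (e.drop 75)]
    rw [pv_cnt_succ _ hmax]
    have hlen : max (max (a.drop 75).length (p.drop 75).length) (e.drop 75).length
        = max (max a.length p.length) e.length - 75 := by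
      simp only [List.length_drop]; omega
    rw [hlen]
    rw [List.range_succ_eq_map]
    simp only [List.map_cons, List.map_map]
    congr 1
    apply List.map_congr_left
    intro k _
    show pvRow (List.drop 75 a) (List.drop 75 p) (List.drop 75 e) k = pvRow a p e (k + 1)
    exact (pvRow_succ a p e k).symm
termination_by a.length + p.length + e.length
decreasing_by
  simp only [List.length_drop]
  rcases a with _ | ⟨x, a⟩ <;> rcases p with _ | ⟨y, p⟩ <;> rcases e with _ | ⟨z, e⟩ <;>
    simp_all <;> omega

theorem pv_slice_chunk (xs : List Int) (k : Nat) :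
    PySem.List.slice xs (some ((75 * k : Nat) : Int)) (some (((75 * k : Nat) : Int) + 75)) =
      (xs.drop (75 * k)).take 75 := by
  have e1 : (((75 * k : Nat) : Int)).toNat = 75 * k := by omega
  have e2 : ((((75 * k : Nat) : Int)) + 75).toNat = 75 * k + 75 := by omega
  rw [PySem.List.slice_toNat xs (by omega) (by omega), e1, e2]
  have e3 : 75 * k + 75 - 75 * k = 75 := by omega
  rw [e3]

-- A's range/slice loop in the same normal form
theorem pv_range_slices (a p e : List Int) :
    ((PySem.List.pyRange 0 (max (max (a.length : Int) (p.length : Int)) (e.length : Int)) 75).foldl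
      (fun acc s =>
        acc ++ [[("attributes", PySem.List.slice a (some s) (some (s + 75))),
                 ("purchases",  PySem.List.slice p (some s) (some (s + 75))),
                 ("events",     PySem.List.slice e (some s) (some (s + 75)))]]) []) =
      (List.range ((max (max a.length p.length) e.length + 74) / 75)).map (pvRow a p e) := by
  rw [PySem.List.foldl_append_singleton_eq_map]
  rw [PySem.List.pyRange_of_pos 0 _ (by norm_num : (0:Int) < 75)]
  rw [List.map_map]
  have hcnt : (if (0:Int) < max (max (a.length : Int) (p.length : Int)) (e.length : Int)
      then ((max (max (a.length : Int) (p.length : Int)) (e.length : Int) - 0 + 75 - 1) / 75).toNat else 0)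
      = (max (max a.length p.length) e.length + 74) / 75 := by
    split_ifs with h
    · omega
    · omega
  rw [hcnt, List.nil_append]
  apply List.map_congr_left
  intro k _
  have hs : (0 : Int) + 75 * (k : Int) = ((75 * k : Nat) : Int) := by push_cast; ring
  simp only [Function.comp, pvRow, hs, pv_slice_chunk]

theorem pv_inner_eq (ps : List (List (String × Int))) (c : String) :
    ((ps.foldl (fun f payload =>
        payload.foldl (fun f kv => f.modify kv.1 [] (fun xs => xs ++ [kv.2])) f)
        (PySem.Dict.mk [("attributes", []), ("purchases", []), ("events", [])])).getD c [])
      = ((ps.flatMap (fun payload => payload)).filter (fun kv => kv.1 == c)).map (fun kv => kv.2) := by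
  have h : ∀ (d : PySem.Dict String (List Int)),
      (ps.foldl (fun f payload =>
        payload.foldl (fun f kv => f.modify kv.1 [] (fun xs => xs ++ [kv.2])) f) d)
      = ((ps.flatMap (fun payload => payload)).foldl
          (fun f kv => f.modify kv.1 [] (fun xs => xs ++ [kv.2])) d) := by
    induction ps with
    | nil => intro d; simp
    | cons hd tl ih => intro d; simp [List.foldl_append, ih]
  rw [h]
  rw [PySem.Dict.getD_foldl_modify_append]
  have h0 : (PySem.Dict.mk [("attributes", ([] : List Int)), ("purchases", []), ("events", [])]).getD c [] = [] := by
    simp only [PySem.Dict.getD_eq_get?_getD, PySem.Dict.get?_mk_cons]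
    split_ifs <;> rfl
  rw [h0, List.nil_append]

theorem pv_eq (payloads : List (String × List (List (String × Int)))) :
    chunk_grouper payloads = chunk_grouper_alt payloads := by
  unfold chunk_grouper chunk_grouper_alt
  refine congrArg PySem.Dict.items ?_
  apply PySem.List.foldl_congr_mem
  intro acc dp _
  simp only []
  refine congrArg (acc.insert dp.1) ?_
  rw [pv_inner_eq dp.2 "attributes", pv_inner_eq dp.2 "purchases", pv_inner_eq dp.2 "events"]
  rw [pv_range_slices, pv_zip3_chunks]

-- ===== VERDICT (by name: the statement is the Claim_ definition above) =====
theorem chunk_grouper_spec : Claim_equal_chunk_grouper := by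
  intro payloads _ _
  unfold Spec_chunk_grouper
  exact pv_eq payloads
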